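-- pv_equiv track=rewrite | github.com/Anny26022/SymbolIndustryTracker | utils/data_processor.py | format_tv_output
-- ===== SOURCE A (Python) =====
-- from typing import List, Tuple, Dict
-- from collections import defaultdict
--
-- def format_tv_output(mapped_symbols: Dict[str, str]) -> str:
--     """Format the output in TradingView compatible format with industry grouping."""
--     # Group symbols by industry
--     industry_groups = defaultdict(list)
--     for symbol, industry in mapped_symbols.items():
--         industry_groups[industry].append(symbol)
--
--     # Format output with industry grouping
--     formatted_lines = []
--     for industry, symbols in sorted(industry_groups.items()):
--         symbol_count = len(symbols)
--         nse_symbols = [f"NSE:{symbol}" for symbol in sorted(symbols)]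
--         formatted_line = f"###{industry}({symbol_count}),{','.join(nse_symbols)}"
--         formatted_lines.append(formatted_line)
--
--     return ",".join(formatted_lines)
-- ===== SOURCE B (Python) =====
-- from typing import Dict
-- from itertools import groupby
--
-- def format_tv_output(mapped_symbols: Dict[str, str]) -> str:
--     """Format the output in TradingView compatible format with industry grouping."""
--     # One global sort of (industry, symbol) pairs, then a single grouping pass.
--     pairs = sorted((industry, symbol) for symbol, industry in mapped_symbols.items())
--     lines = []
--     for industry, group in groupby(pairs, key=lambda p: p[0]):
--         symbols = [s for _, s in group]
--         lines.append(f"###{industry}({len(symbols)})," + ",".join("NSE:" + s for s in symbols))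
--     return ",".join(lines)
-- ===== Notes on version B (the rewrite author's own statement) =====
-- stated objective: alternative
-- what changed: Replaces dict-accumulation of per-industry lists followed by per-group sorts with one global sort of (industry, symbol) pairs and a single itertools.groupby pass.
import Mathlib
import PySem

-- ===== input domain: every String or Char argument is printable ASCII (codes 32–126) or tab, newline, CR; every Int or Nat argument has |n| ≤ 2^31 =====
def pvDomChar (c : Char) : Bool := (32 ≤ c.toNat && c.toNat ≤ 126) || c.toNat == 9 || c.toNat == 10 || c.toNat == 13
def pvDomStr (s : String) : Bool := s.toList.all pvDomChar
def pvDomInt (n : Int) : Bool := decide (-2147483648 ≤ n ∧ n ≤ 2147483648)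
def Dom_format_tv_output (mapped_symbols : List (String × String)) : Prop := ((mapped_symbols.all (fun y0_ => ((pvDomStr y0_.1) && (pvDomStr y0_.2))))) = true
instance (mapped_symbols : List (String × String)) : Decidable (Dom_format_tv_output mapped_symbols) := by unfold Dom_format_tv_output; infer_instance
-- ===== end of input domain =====

-- B replaces A's dict-accumulation-then-per-group-sort with one global sort of (industry, symbol)
-- pairs followed by a single groupby pass (objective: alternative decomposition, same O(n log n) cost).

-- ===== PORT A =====
-- formatted_line = f"###{industry}({symbol_count}),{','.join(nse_symbols)}" with the per-group sort inside
def lineA (p : String × List String) : String :=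
  let symbol_count : Int := PySem.List.len p.2
  let nse_symbols := (PySem.List.sorted p.2 (fun s => s)).map (fun s => PySem.Str.join "" ["NSE:", s])
  PySem.Str.join "" ["###", p.1, "(", PySem.Int.toStr symbol_count, "),", PySem.Str.join "," nse_symbols]

def format_tv_output (mapped_symbols : List (String × String)) : String :=
  -- for symbol, industry in mapped_symbols.items(): industry_groups[industry].append(symbol)
  let items := (PySem.Dict.ofList mapped_symbols).items
  let industry_groups :=
    items.foldl (fun d p => d.modify p.2 [] (fun l => l ++ [p.1])) PySem.Dict.empty
  -- for industry, symbols in sorted(industry_groups.items()): formatted_lines.append(…)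
  let formatted_lines :=
    (PySem.List.sorted2 industry_groups.items Prod.fst Prod.snd).foldl
      (fun acc p => acc ++ [lineA p]) []
  PySem.Str.join "," formatted_lines

-- ===== PORT B =====
-- lines.append(f"###{industry}({len(symbols)})," + ",".join("NSE:" + s for s in symbols))
def lineB (industry : String) (symbols : List String) : String :=
  PySem.Str.join "" ["###", industry, "(", PySem.Int.toStr (PySem.List.len symbols), "),",
    PySem.Str.join "," (symbols.map (fun s => PySem.Str.join "" ["NSE:", s]))]

-- itertools.groupby on a list sorted by (industry, symbol): consecutive runs of equal first component
def runsB : List (String × String) → List (String × List String)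
  | [] => []
  | (i, s) :: rest =>
      (i, s :: (rest.takeWhile (fun p => p.1 == i)).map Prod.snd) ::
        runsB (rest.dropWhile (fun p => p.1 == i))
  termination_by l => l.length
  decreasing_by
    have := List.length_dropWhile_le (fun p => p.1 == i) rest
    simp; omega

def format_tv_output_alt (mapped_symbols : List (String × String)) : String :=
  -- pairs = sorted((industry, symbol) for symbol, industry in mapped_symbols.items())
  let pairs := ((PySem.Dict.ofList mapped_symbols).items).map (fun p => (p.2, p.1))
  let sorted_pairs := PySem.List.sorted2 pairs Prod.fst Prod.snd
  PySem.Str.join "," ((runsB sorted_pairs).map (fun g => lineB g.1 g.2))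

-- ===== PRECONDITION & SPEC =====
def Spec_format_tv_output (mapped_symbols : List (String × String)) (out : String) : Prop := out = format_tv_output_alt mapped_symbols
instance (mapped_symbols : List (String × String)) (out : String) : Decidable (Spec_format_tv_output mapped_symbols out) := by unfold Spec_format_tv_output; infer_instance

-- ===== CLAIM (what is proved, stated in full; the proofs are below) =====
def Claim_equal_format_tv_output : Prop := ∀ (mapped_symbols : List (String × String)), Dom_format_tv_output mapped_symbols → Spec_format_tv_output mapped_symbols (format_tv_output mapped_symbols)

-- ===== LEMMAS AND PROOFS =====

lemma insertBy_congr {α : Type} (b1 b2 : α → α → Bool) (x : α) (ys : List α)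
    (h : ∀ y ∈ ys, b1 x y = b2 x y) :
    PySem.List.insertBy b1 x ys = PySem.List.insertBy b2 x ys := by
  induction ys with
  | nil => rfl
  | cons y t ih =>
    have hy := h y (List.mem_cons_self ..)
    simp only [PySem.List.insertBy, hy]
    split
    · rfl
    · simpa [PySem.List.insertBy] using congrArg (y :: ·) (ih fun z hz => h z (List.mem_cons_of_mem _ hz))

-- a "sorted(...)" whose first key component is duplicate-free never consults the second component
lemma sorted2_eq_sorted_fst {α κ₂ : Type} [LT κ₂] [DecidableLT κ₂]
    (xs : List α) (k1 : α → String) (k2 : α → κ₂) (h : (xs.map k1).Nodup) :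
    PySem.List.sorted2 xs k1 k2 = PySem.List.sorted xs k1 := by
  simp only [PySem.List.sorted2, PySem.List.sorted, if_neg Bool.false_ne_true]
  suffices H : ∀ (ys acc : List α), ((acc ++ ys).map k1).Nodup →
      ys.foldl (fun acc x => PySem.List.insertBy
        (fun a b => decide (k1 a < k1 b) || (!decide (k1 b < k1 a) && decide (k2 a < k2 b))) x acc) acc
      = ys.foldl (fun acc x => PySem.List.insertBy (fun a b => decide (k1 a < k1 b)) x acc) acc by
    simpa using H xs [] (by simpa using h)
  intro ys
  induction ys with
  | nil => intro acc _; rfl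
  | cons x t ih =>
    intro acc hnd
    have hdisj := (List.nodup_append.mp (by simpa using hnd : (acc.map k1 ++ (x :: t).map k1).Nodup)).2.2
    have hx : ∀ y ∈ acc, k1 x ≠ k1 y := fun y hy =>
      (hdisj _ (List.mem_map_of_mem hy) _ (by simp)).symm
    have hins : PySem.List.insertBy
        (fun a b => decide (k1 a < k1 b) || (!decide (k1 b < k1 a) && decide (k2 a < k2 b))) x acc
        = PySem.List.insertBy (fun a b => decide (k1 a < k1 b)) x acc := by
      apply insertBy_congr
      intro y hy
      rcases lt_trichotomy (k1 x) (k1 y) with hlt | heq | hgt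
      · simp [hlt]
      · exact absurd heq (hx y hy)
      · simp [lt_asymm hgt, hgt]
    simp only [List.foldl_cons, hins]
    apply ih
    have hperm : ((PySem.List.insertBy (fun a b => decide (k1 a < k1 b)) x acc ++ t)).Perm (acc ++ x :: t) := by
      refine ((PySem.List.insertBy_perm _ x acc).append_right t).trans ?_
      exact (List.perm_middle).symm
    exact ((hperm.map k1).nodup_iff).mpr hnd

-- a tuple sort is a plain sort under the lexicographic order on the tuples
lemma sorted2_eq_sorted_lex {α : Type} (xs : List α) (k1 k2 : α → String) :
    PySem.List.sorted2 xs k1 k2 = PySem.List.sorted xs (fun a => toLex (k1 a, k2 a)) := by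
  simp only [PySem.List.sorted2, PySem.List.sorted, if_neg Bool.false_ne_true]
  have hb : (fun a b : α => decide (k1 a < k1 b) || (!decide (k1 b < k1 a) && decide (k2 a < k2 b)))
      = (fun a b : α => decide (toLex (k1 a, k2 a) < toLex (k1 b, k2 b))) := by
    funext a b
    rcases lt_trichotomy (k1 a) (k1 b) with hlt | heq | hgt
    · simp [hlt, Prod.Lex.lt_iff]
    · simp [heq, Prod.Lex.lt_iff]
    · simp [lt_asymm hgt, hgt, Prod.Lex.lt_iff, ne_of_gt hgt]
  rw [hb]

lemma takeWhile_block {α : Type} (p : α → Bool) (l1 l2 : List α)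
    (h1 : ∀ x ∈ l1, p x = true) (h2 : ∀ x ∈ l2, p x = false) :
    (l1 ++ l2).takeWhile p = l1 := by
  induction l1 with
  | nil =>
    cases l2 with
    | nil => rfl
    | cons b t => simp [h2 b (List.mem_cons_self ..)]
  | cons a t ih =>
    simp [h1 a (List.mem_cons_self ..),
      ih fun z hz => h1 z (List.mem_cons_of_mem _ hz)]

lemma dropWhile_block {α : Type} (p : α → Bool) (l1 l2 : List α)
    (h1 : ∀ x ∈ l1, p x = true) (h2 : ∀ x ∈ l2, p x = false) :
    (l1 ++ l2).dropWhile p = l2 := by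
  induction l1 with
  | nil =>
    cases l2 with
    | nil => rfl
    | cons b t => simp [h2 b (List.mem_cons_self ..)]
  | cons a t ih =>
    simp [h1 a (List.mem_cons_self ..),
      ih fun z hz => h1 z (List.mem_cons_of_mem _ hz)]

-- groupby over a concatenation of nonempty blocks with pairwise distinct labels recovers the blocks
lemma runsB_flat (gs : List (String × List String))
    (hne : ∀ g ∈ gs, g.2 ≠ [])
    (hsep : gs.Pairwise (fun a b => a.1 ≠ b.1)) :
    runsB (gs.flatMap (fun g => g.2.map (fun s => (g.1, s)))) = gs := by
  induction gs with
  | nil => simp [runsB]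
  | cons g gs ih =>
    obtain ⟨i, syms⟩ := g
    cases syms with
    | nil => exact absurd rfl (hne _ (List.mem_cons_self ..))
    | cons s tl =>
      have hrest : ∀ q ∈ gs.flatMap (fun g => g.2.map (fun s => (g.1, s))), (q.1 == i) = false := by
        intro q hq
        rw [List.mem_flatMap] at hq
        obtain ⟨g', hg', hq'⟩ := hq
        obtain ⟨s', _, rfl⟩ := List.mem_map.mp hq'
        have : i ≠ g'.1 := (List.pairwise_cons.mp hsep).1 g' hg'
        simpa using fun he => this he.symm
      have hblk : ∀ q ∈ tl.map (fun s => ((i : String), s)), (q.1 == i) = true := by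
        intro q hq
        obtain ⟨s', _, rfl⟩ := List.mem_map.mp hq
        simp
      have hcons : (((s :: tl).map (fun s => ((i:String), s))) ++ gs.flatMap (fun g => g.2.map (fun s => (g.1, s))))
          = ((i, s) :: (tl.map (fun s => (i, s)) ++ gs.flatMap (fun g => g.2.map (fun s => (g.1, s))))) := by
        simp
      rw [List.flatMap_cons, hcons, runsB,
        takeWhile_block _ _ _ hblk hrest, dropWhile_block _ _ _ hblk hrest,
        ih (fun g hg => hne g (List.mem_cons_of_mem _ hg)) (List.pairwise_cons.mp hsep).2]
      simp [List.map_map]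

-- a sort whose keys are duplicate-free is strictly increasing
lemma sorted_pairwise_lt {α κ : Type} [LinearOrder κ] (xs : List α) (key : α → κ)
    (h : (xs.map key).Nodup) :
    (PySem.List.sorted xs key).Pairwise (fun a b => key a < key b) := by
  have hperm : ((PySem.List.sorted xs key).map key).Perm (xs.map key) :=
    (PySem.List.sorted_perm xs key false).map key
  have hnd : ((PySem.List.sorted xs key).map key).Nodup := hperm.nodup_iff.mpr h
  have hne : (PySem.List.sorted xs key).Pairwise (fun a b => key a ≠ key b) :=
    (List.pairwise_map).mp hnd
  have hle := PySem.List.sorted_pairwise xs key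
  exact (hle.and hne).imp fun hab => lt_of_le_of_ne hab.1 hab.2

-- distributing a list over the distinct values of its first component is a permutation
lemma flatMap_filter_perm (l : List (String × String)) (keys : List String) (hnd : keys.Nodup)
    (hcov : ∀ p ∈ l, p.1 ∈ keys) :
    (keys.flatMap fun i => l.filter (fun p => p.1 == i)).Perm l := by
  suffices H : ∀ (ks : List String), ks.Nodup →
      (ks.flatMap fun i => l.filter (fun p => p.1 == i)).Perm (l.filter (fun p => decide (p.1 ∈ ks))) by
    refine (H keys hnd).trans ?_
    rw [List.filter_eq_self.mpr fun p hp => by simpa using hcov p hp]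
  intro ks
  induction ks with
  | nil => simp
  | cons k t ih =>
    intro hnd
    have hk : k ∉ t := (List.nodup_cons.mp hnd).1
    rw [List.flatMap_cons]
    refine (List.Perm.append_left _ (ih (List.nodup_cons.mp hnd).2)).trans ?_
    have h1 : (l.filter (fun p => decide (p.1 ∈ k :: t))).filter (fun p => p.1 == k)
        = l.filter (fun p => p.1 == k) := by
      rw [List.filter_filter]
      apply List.filter_congr
      intro p _
      by_cases h : p.1 = k <;> simp [h]
    have h2 : (l.filter (fun p => decide (p.1 ∈ k :: t))).filter (fun p => !(p.1 == k))
        = l.filter (fun p => decide (p.1 ∈ t)) := by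
      rw [List.filter_filter]
      apply List.filter_congr
      intro p _
      by_cases h : p.1 = k
      · simp [h, hk]
      · simp [h]
    rw [← h1, ← h2]
    exact List.filter_append_perm _ _

-- symbols grouped under industry i, if the dict items are swapped into (industry, symbol) pairs
def symsOfB (pairs : List (String × String)) (i : String) : List String :=
  (pairs.filter (fun q => q.1 == i)).map (fun q => q.2)

lemma main_eq (ms : List (String × String)) :
    format_tv_output ms = format_tv_output_alt ms := by
  unfold format_tv_output format_tv_output_alt
  dsimp only
  congr 1
  -- shared names
  have hndI : ((PySem.Dict.ofList ms).items.map Prod.fst).Nodup :=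
    PySem.Dict.nodup_keys_ofList ms
  set I := (PySem.Dict.ofList ms).items with hIdef
  set pairs := I.map (fun p => ((p.2 : String), (p.1 : String))) with hpairs
  set inds := PySem.Set.ofList (I.map Prod.snd) with hinds
  set sInds := PySem.List.sorted inds (fun x => x) with hsInds
  set G := I.foldl (fun d p => d.modify p.2 [] (fun l => l ++ [p.1])) PySem.Dict.empty with hG
  -- the grouping dict, characterised
  have hGkeys : G.keys = inds := by
    rw [hG, PySem.Dict.keys_foldl_modify_key I Prod.snd ([] : List String)
      (fun d x => fun l => l ++ [x.1]) PySem.Dict.empty]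
    simp only [PySem.Dict.keys_empty, PySem.Set.update_nil_left]
    exact hinds.symm
  have hGnd : G.keys.Nodup := by rw [hGkeys, hinds]; exact PySem.Set.nodup_ofList _
  have hfold : G = pairs.foldl (fun d q => d.modify q.1 [] (fun l => l ++ [q.2])) PySem.Dict.empty := by
    rw [hpairs, List.foldl_map]
  have hGetD : ∀ i, G.getD i [] = symsOfB pairs i := by
    intro i
    rw [hfold, PySem.Dict.getD_foldl_modify_append]
    simp [symsOfB, PySem.Dict.getD, PySem.Dict.get?, PySem.Dict.empty]
  have hItems : G.items = inds.map (fun i => (i, symsOfB pairs i)) := by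
    rw [PySem.Dict.items_eq_map_keys G hGnd [], hGkeys]
    exact List.map_congr_left fun i _ => by rw [hGetD]
  have hpairs_fst : pairs.map Prod.fst = I.map Prod.snd := by
    rw [hpairs, List.map_map]; rfl
  have hsIndsLt : sInds.Pairwise (· < ·) := by
    rw [hsInds, hinds]; exact PySem.List.sorted_ofList_pairwise_lt _
  -- A's sorted grouping
  have hA : PySem.List.sorted2 G.items Prod.fst Prod.snd
      = sInds.map (fun i => (i, symsOfB pairs i)) := by
    rw [sorted2_eq_sorted_fst _ _ _ (show (G.items.map Prod.fst).Nodup from hGnd)]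
    apply PySem.List.sorted_eq_of_perm_of_pairwise_lt
    · rw [hItems]; exact (PySem.List.sorted_perm _ _ _).map _
    · rw [List.pairwise_map]; exact hsIndsLt
  -- the symbols of each group are duplicate-free
  have symsNd : ∀ i, (symsOfB pairs i).Nodup := by
    intro i
    have hsub : List.Sublist (symsOfB pairs i) (pairs.map (fun q => q.2)) :=
      List.Sublist.map _ List.filter_sublist
    have : (pairs.map (fun q => q.2)).Nodup := by
      rw [hpairs, List.map_map]; exact hndI
    exact this.sublist hsub
  -- B's globally sorted pair list is the blocks laid end to end
  have hB : PySem.List.sorted2 pairs Prod.fst Prod.snd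
      = sInds.flatMap (fun i => (PySem.List.sorted (symsOfB pairs i) (fun s => s)).map (fun s => (i, s))) := by
    rw [sorted2_eq_sorted_lex]
    apply PySem.List.sorted_eq_of_perm_of_pairwise_lt
    · have hblockeq : ∀ i, ((PySem.List.sorted (symsOfB pairs i) (fun s => s)).map (fun s => (i, s))).Perm
          (pairs.filter (fun q => q.1 == i)) := by
        intro i
        have h1 : ((symsOfB pairs i).map (fun s => (i, s))) = pairs.filter (fun q => q.1 == i) := by
          rw [symsOfB, List.map_map]
          refine (List.map_congr_left ?_).trans (List.map_id _)
          intro q hq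
          have hq1 : q.1 = i := by simpa using (List.mem_filter.mp hq).2
          simp [Function.comp, ← hq1]
        rw [← h1]
        exact (PySem.List.sorted_perm _ _ _).map _
      refine (List.Perm.flatMap_left sInds fun i _ => hblockeq i).trans ?_
      refine (List.Perm.flatMap_right _ (PySem.List.sorted_perm _ _ _)).trans ?_
      apply flatMap_filter_perm
      · rw [hinds]; exact PySem.Set.nodup_ofList _
      · intro q hq
        rw [hinds, ← hpairs_fst]
        exact (PySem.Set.mem_ofList _ _).mpr (List.mem_map_of_mem hq)
    · rw [List.pairwise_flatMap]
      constructor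
      · intro i hi
        rw [List.pairwise_map]
        refine (sorted_pairwise_lt (symsOfB pairs i) (fun s => s) (by simpa using symsNd i)).imp ?_
        intro a b hab
        simp only [Prod.Lex.lt_iff]
        exact Or.inr ⟨rfl, hab⟩
      · refine hsIndsLt.imp ?_
        intro a b hab x hx y hy
        obtain ⟨s1, _, rfl⟩ := List.mem_map.mp hx
        obtain ⟨s2, _, rfl⟩ := List.mem_map.mp hy
        simp only [Prod.Lex.lt_iff]
        exact Or.inl hab
  -- the groupby pass recovers exactly the blocks
  have hruns : runsB (sInds.flatMap (fun i => (PySem.List.sorted (symsOfB pairs i) (fun s => s)).map (fun s => (i, s))))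
      = sInds.map (fun i => (i, PySem.List.sorted (symsOfB pairs i) (fun s => s))) := by
    have h := runsB_flat (sInds.map (fun i => (i, PySem.List.sorted (symsOfB pairs i) (fun s => s))))
      (by
        intro g hg
        obtain ⟨i, hi, rfl⟩ := List.mem_map.mp hg
        simp only [ne_eq, PySem.List.sorted_eq_nil_iff]
        have hii : i ∈ inds := by
          rw [hsInds] at hi
          exact (PySem.List.mem_sorted _ _ _ _).mp hi
        have hiin : i ∈ pairs.map Prod.fst := by
          rw [hpairs_fst]
          exact (PySem.Set.mem_ofList _ _).mp (hinds ▸ hii)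
        obtain ⟨q, hq, rfl⟩ := List.mem_map.mp hiin
        have hmem : q ∈ pairs.filter (fun r => r.1 == q.1) := List.mem_filter.mpr ⟨hq, by simp⟩
        simp only [symsOfB, List.map_eq_nil_iff]
        exact List.ne_nil_of_mem hmem
      )
      (by rw [List.pairwise_map]; exact hsIndsLt.imp fun hab => ne_of_lt hab)
    rw [List.flatMap_map] at h
    simpa using h
  rw [PySem.List.foldl_append_singleton_eq_map, hA, hB, hruns, List.map_map, List.map_map]
  apply List.map_congr_left
  intro i _
  simp [lineA, lineB, PySem.List.len_eq, PySem.List.length_sorted]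

-- ===== VERDICT (by name: the statement is the Claim_ definition above) =====
theorem format_tv_output_spec : Claim_equal_format_tv_output := by
  intro ms _
  exact main_eq ms
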